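-- pv_equiv track=rewrite | github.com/nix6839/algorithm-solving | 이취코 with 파이썬/a_greedy/d_adventurer_guild.py | d_adventurer_guild
-- ===== SOURCE A (Python) =====
-- from typing import List
--
-- def d_adventurer_guild(adventurers: List[int]) -> int:
--     group_count = 0
--
--     adventurer_count = 0
--     for adventurer in sorted(adventurers):
--         adventurer_count += 1
--
--         if adventurer_count == adventurer:
--             group_count += 1
--             adventurer_count = 0
--
--     return group_count
-- ===== SOURCE B (Python) =====
-- from typing import List
--
-- def d_adventurer_guild(adventurers: List[int]) -> int:
--     freq = {}
--     for a in adventurers: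
--         freq[a] = freq.get(a, 0) + 1
--
--     group_count = 0
--     carry = 0
--     for fear in sorted(freq):
--         m = freq[fear]
--         if carry < fear <= carry + m:
--             rest = m - (fear - carry)
--             group_count += 1 + rest // fear
--             carry = rest % fear
--         else:
--             carry += m
--     return group_count
-- ===== Notes on version B (the rewrite author's own statement) =====
-- stated objective: alternative
-- what changed: Replaces A's per-element increment/compare pass over the fully sorted list by building a frequency table once and doing one arithmetic pass over the distinct fear values in ascending order, closing 1 + (m-(v-carry))//v groups per value by division instead of element by element.
import Mathlib
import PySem

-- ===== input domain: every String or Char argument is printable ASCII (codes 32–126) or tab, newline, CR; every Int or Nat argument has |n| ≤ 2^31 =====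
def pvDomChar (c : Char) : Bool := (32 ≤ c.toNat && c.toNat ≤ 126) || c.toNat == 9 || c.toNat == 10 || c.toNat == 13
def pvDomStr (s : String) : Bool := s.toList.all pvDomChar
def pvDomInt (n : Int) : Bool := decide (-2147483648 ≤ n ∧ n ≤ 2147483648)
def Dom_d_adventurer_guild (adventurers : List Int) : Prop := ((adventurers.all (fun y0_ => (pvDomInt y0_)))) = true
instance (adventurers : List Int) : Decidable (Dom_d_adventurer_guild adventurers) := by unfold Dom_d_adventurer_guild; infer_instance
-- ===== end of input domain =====

-- B replaces A's per-element scan of the sorted list by one arithmetic pass over a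
-- frequency table of the distinct fear values (objective: alternative decomposition).

-- ===== PORT A =====
-- loop body of A: increment the running member count, close a group when it equals the fear value
def pvStepA (st : Int × Int) (adventurer : Int) : Int × Int :=
  let c := st.2 + 1
  if c = adventurer then (st.1 + 1, 0) else (st.1, c)

def d_adventurer_guild (adventurers : List Int) : Int :=
  ((PySem.List.sorted adventurers (fun x => x) false).foldl pvStepA (0, 0)).1

-- ===== PORT B =====
-- loop body of B: for one distinct fear value with multiplicity m, close the groups it completes arithmetically
def pvStepB (freq : PySem.Dict Int Int) (st : Int × Int) (fear : Int) : Int × Int :=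
  let m := freq.getD fear 0
  if st.2 < fear ∧ fear ≤ st.2 + m then
    let rest := m - (fear - st.2)
    (st.1 + 1 + PySem.Int.floordiv rest fear, PySem.Int.mod rest fear)
  else (st.1, st.2 + m)

def d_adventurer_guild_alt (adventurers : List Int) : Int :=
  let freq := adventurers.foldl (fun d a => d.insert a (d.getD a 0 + 1)) PySem.Dict.empty
  ((PySem.List.sorted freq.keys (fun x => x) false).foldl (pvStepB freq) (0, 0)).1

-- ===== PRECONDITION & SPEC =====
def Spec_d_adventurer_guild (adventurers : List Int) (out : Int) : Prop := out = d_adventurer_guild_alt adventurers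
instance (adventurers : List Int) (out : Int) : Decidable (Spec_d_adventurer_guild adventurers out) := by unfold Spec_d_adventurer_guild; infer_instance

-- ===== CLAIM (what is proved, stated in full; the proofs are below) =====
def Claim_equal_d_adventurer_guild : Prop := ∀ (adventurers : List Int), Dom_d_adventurer_guild adventurers → Spec_d_adventurer_guild adventurers (d_adventurer_guild adventurers)

-- ===== LEMMAS AND PROOFS =====

-- B's step with the counts supplied as a function (proof-only abstraction of pvStepB)
def pvStepC (cnt : Int → Nat) (st : Int × Int) (v : Int) : Int × Int :=
  if st.2 < v ∧ v ≤ st.2 + (cnt v : Int) then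
    (st.1 + 1 + PySem.Int.floordiv ((cnt v : Int) - (v - st.2)) v,
     PySem.Int.mod ((cnt v : Int) - (v - st.2)) v)
  else (st.1, st.2 + (cnt v : Int))

-- closed form of A's loop over a run of n equal values v, starting from a nonnegative count c
theorem pvRunA (n : Nat) (v : Int) : ∀ (g c : Int), 0 ≤ c →
    (List.replicate n v).foldl pvStepA (g, c) =
      if c < v ∧ v ≤ c + (n : Int) then
        (g + 1 + PySem.Int.floordiv ((n : Int) - (v - c)) v,
         PySem.Int.mod ((n : Int) - (v - c)) v)
      else (g, c + (n : Int)) := by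
  induction n with
  | zero =>
    intro g c hc
    simp only [List.replicate, List.foldl_nil, Nat.cast_zero]
    rw [if_neg (by omega)]
    simp
  | succ m ih =>
    intro g c hc
    simp only [List.replicate_succ, List.foldl_cons]
    by_cases hv : c + 1 = v
    · have hvpos : 0 < v := by omega
      rw [show pvStepA (g, c) v = (g + 1, 0) by simp [pvStepA, hv]]
      rw [ih (g + 1) 0 le_rfl]
      by_cases hm : (0 : Int) < v ∧ v ≤ 0 + (m : Int)
      · rw [if_pos hm, if_pos (show c < v ∧ v ≤ c + ((m + 1 : Nat) : Int) by push_cast; omega)]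
        rw [PySem.Int.floordiv_eq_ediv_of_pos hvpos, PySem.Int.mod_eq_emod_of_pos hvpos,
            PySem.Int.floordiv_eq_ediv_of_pos hvpos, PySem.Int.mod_eq_emod_of_pos hvpos]
        have h1 : ((m + 1 : Nat) : Int) - (v - c) = ((m : Int) - (v - 0)) + 1 * v := by
          push_cast; omega
        rw [h1, Int.add_mul_ediv_right _ _ (show v ≠ 0 by omega), Int.add_mul_emod_self_right _ _ _]
        simp only [Prod.mk.injEq]
        exact ⟨by ring, trivial⟩
      · rw [if_neg hm, if_pos (show c < v ∧ v ≤ c + ((m + 1 : Nat) : Int) by push_cast; omega)]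
        have h2 : ((m + 1 : Nat) : Int) - (v - c) = (m : Int) := by push_cast; omega
        rw [h2, PySem.Int.floordiv_eq_ediv_of_pos hvpos, PySem.Int.mod_eq_emod_of_pos hvpos,
            Int.ediv_eq_zero_of_lt (by omega) (by omega), Int.emod_eq_of_lt (by omega) (by omega)]
        simp only [Prod.mk.injEq]
        exact ⟨by ring, by omega⟩
    · rw [show pvStepA (g, c) v = (g, c + 1) by simp [pvStepA, hv]]
      rw [ih g (c + 1) (by omega)]
      by_cases hcond : c + 1 < v ∧ v ≤ c + 1 + (m : Int)
      · rw [if_pos hcond, if_pos (show c < v ∧ v ≤ c + ((m + 1 : Nat) : Int) by push_cast; omega)]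
        have h3 : (m : Int) - (v - (c + 1)) = ((m + 1 : Nat) : Int) - (v - c) := by push_cast; omega
        rw [h3]
      · rw [if_neg hcond, if_neg (show ¬(c < v ∧ v ≤ c + ((m + 1 : Nat) : Int)) by push_cast; omega)]
        have h4 : c + 1 + (m : Int) = c + ((m + 1 : Nat) : Int) := by push_cast; ring
        rw [h4]

-- A's loop over the concatenated runs equals the per-distinct-value fold of B's shape
theorem pvFoldFlat (cnt : Int → Nat) : ∀ (ds : List Int) (g c : Int), 0 ≤ c →
    ((ds.flatMap (fun v => List.replicate (cnt v) v)).foldl pvStepA (g, c)) =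
      ds.foldl (pvStepC cnt) (g, c) := by
  intro ds
  induction ds with
  | nil => intro g c hc; simp
  | cons v t ih =>
    intro g c hc
    simp only [List.flatMap_cons, List.foldl_append, List.foldl_cons]
    rw [pvRunA _ _ _ _ hc]
    rw [show pvStepC cnt (g, c) v =
      if c < v ∧ v ≤ c + ((cnt v : Nat) : Int) then
        (g + 1 + PySem.Int.floordiv ((cnt v : Int) - (v - c)) v,
         PySem.Int.mod ((cnt v : Int) - (v - c)) v)
      else (g, c + (cnt v : Int)) from rfl]
    by_cases hcond : c < v ∧ v ≤ c + ((cnt v : Nat) : Int)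
    · rw [if_pos hcond]
      apply ih
      rw [PySem.Int.mod_eq_emod_of_pos (by omega)]
      exact Int.emod_nonneg _ (by omega)
    · rw [if_neg hcond]
      apply ih
      positivity

theorem pvCountFlat (xs : List Int) : ∀ (ds : List Int), ds.Nodup → ∀ y,
    (ds.flatMap (fun v => List.replicate (xs.count v) v)).count y =
      if y ∈ ds then xs.count y else 0 := by
  intro ds
  induction ds with
  | nil => intro _ y; simp
  | cons v t ih =>
    intro hnd y
    rw [List.nodup_cons] at hnd
    simp only [List.flatMap_cons, List.count_append, List.count_replicate, ih hnd.2 y,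
      List.mem_cons, beq_iff_eq]
    by_cases hy : y = v
    · subst hy
      simp [hnd.1]
    · rw [if_neg (show ¬ v = y from fun h => hy h.symm)]
      by_cases ht : y ∈ t
      · rw [if_pos ht, if_pos (Or.inr ht)]; omega
      · rw [if_neg ht, if_neg (by tauto)]

theorem pvPairwiseFlat (cnt : Int → Nat) : ∀ (ds : List Int), ds.Pairwise (· < ·) →
    (ds.flatMap (fun v => List.replicate (cnt v) v)).Pairwise (· ≤ ·) := by
  intro ds
  induction ds with
  | nil => intro _; simp
  | cons v t ih =>
    intro hp
    rw [List.pairwise_cons] at hp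
    simp only [List.flatMap_cons]
    rw [List.pairwise_append]
    refine ⟨List.pairwise_replicate.mpr (Or.inr le_rfl), ih hp.2, ?_⟩
    intro a ha b hb
    rw [List.eq_of_mem_replicate ha]
    obtain ⟨u, hu, hbu⟩ := List.mem_flatMap.mp hb
    rw [List.eq_of_mem_replicate hbu]
    exact le_of_lt (hp.1 u hu)

-- sorted(xs) is the runs of the distinct values in increasing order
theorem pvSortedFlat (xs : List Int) :
    PySem.List.sorted xs (fun x => x) false =
      (PySem.List.sorted (PySem.Set.ofList xs) (fun x => x) false).flatMap
        (fun v => List.replicate (xs.count v) v) := by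
  have hlt := PySem.List.sorted_ofList_pairwise_lt (xs := xs)
  have hnd : (PySem.List.sorted (PySem.Set.ofList xs) (fun x => x) false).Nodup :=
    hlt.imp (fun h => ne_of_lt h)
  apply PySem.List.sorted_id_eq_of_perm_of_pairwise
  · rw [List.perm_iff_count]
    intro y
    rw [pvCountFlat xs _ hnd y]
    by_cases hy : y ∈ xs
    · rw [if_pos]
      rw [PySem.List.mem_sorted, PySem.Set.mem_ofList]
      exact hy
    · rw [if_neg, (List.count_eq_zero).mpr hy]
      rw [PySem.List.mem_sorted, PySem.Set.mem_ofList]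
      exact hy
  · exact pvPairwiseFlat _ _ hlt

-- ===== VERDICT (by name: the statement is the Claim_ definition above) =====
theorem d_adventurer_guild_spec : Claim_equal_d_adventurer_guild := by
  intro xs _
  show d_adventurer_guild xs = d_adventurer_guild_alt xs
  simp only [d_adventurer_guild, d_adventurer_guild_alt,
    PySem.Dict.foldl_insert_getD_add_one_eq_counter, PySem.Dict.keys_counter]
  have hstep : pvStepB (PySem.Dict.counter xs) = pvStepC xs.count := by
    funext st v
    simp only [pvStepB, pvStepC, PySem.Dict.getD_counter]
  rw [hstep, pvSortedFlat xs, pvFoldFlat xs.count _ 0 0 le_rfl]
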